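-- pv_equiv track=rewrite | github.com/yakki77/Task11 | decision tree/decision_tree_v5_B_All.py | get_newDataset
-- ===== SOURCE A (Python) =====
-- def get_newDataset(dataset, attributes, best_attribute, given_val):
--     new_dataset = [[]]
--     row_number_list = []
--     index = attributes.index(best_attribute)
--     row_number = 0
--     for row in dataset:
--         # get rows that excludes the given value(e.g. Student)
--         if (row[index] == given_val):
--             new_entry = []
--             # scan the whole row that contains the given_val
--             for i in range(0, len(row)):
--                 if (i != index):
--                     new_entry.append(row[i])
--             row_number_list.append(row_number)
--             new_dataset.append(new_entry)
--         row_number =row_number+1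
--     new_dataset.remove([])
--     return new_dataset, row_number_list
-- ===== SOURCE B (Python) =====
-- def get_newDataset(dataset, attributes, best_attribute, given_val):
--     index = attributes.index(best_attribute)
--     row_number_list = [i for i, row in enumerate(dataset) if row[index] == given_val]
--     new_dataset = [dataset[i][:index] + dataset[i][index + 1:] for i in row_number_list]
--     return new_dataset, row_number_list
-- ===== Notes on version B (the rewrite author's own statement) =====
-- stated objective: simpler
-- what changed: Replaces A's single fused loop (manual row counter, element-by-element inner copy loop, sentinel-seeded list cleaned up by remove([])) with two comprehensions: one pass collecting matching row indices, then an index-driven gather that drops the column by slicing.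
import Mathlib
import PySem

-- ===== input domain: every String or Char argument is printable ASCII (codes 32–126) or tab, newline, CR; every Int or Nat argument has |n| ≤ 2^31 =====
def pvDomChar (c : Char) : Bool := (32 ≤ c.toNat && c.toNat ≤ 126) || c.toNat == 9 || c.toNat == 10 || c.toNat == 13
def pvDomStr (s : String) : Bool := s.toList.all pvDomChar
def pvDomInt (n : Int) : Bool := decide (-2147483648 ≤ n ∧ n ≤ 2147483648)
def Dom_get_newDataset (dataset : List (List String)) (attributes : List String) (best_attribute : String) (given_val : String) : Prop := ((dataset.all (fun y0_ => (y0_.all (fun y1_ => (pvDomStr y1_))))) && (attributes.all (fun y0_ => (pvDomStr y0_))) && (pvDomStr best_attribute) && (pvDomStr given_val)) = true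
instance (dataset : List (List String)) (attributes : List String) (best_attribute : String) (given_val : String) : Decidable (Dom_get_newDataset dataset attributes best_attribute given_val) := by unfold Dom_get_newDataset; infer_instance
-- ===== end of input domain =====

-- B replaces A's fused filter-and-copy loop (manual counter, inner element loop, sentinel [] removed
-- at the end) by two comprehensions: collect matching row indices, then gather rows by index with slices. Objective: simpler.


-- ===== PORT A =====
def get_newDataset (dataset : List (List String)) (attributes : List String) (best_attribute : String) (given_val : String) : List (List String) × List Int :=
  -- index = attributes.index(best_attribute); Pre_ guarantees membership, so getD 0 is never taken
  let index : Nat := (PySem.List.index? attributes best_attribute).getD 0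
  let st := dataset.foldl
    (fun (st : List (List String) × List Int × Int) row =>
      if PySem.List.pyGetD row (index : Int) "" == given_val then
        let new_entry := (PySem.List.pyRange 0 row.length 1).foldl
          (fun acc i => if i ≠ (index : Int) then acc ++ [PySem.List.pyGetD row i ""] else acc) []
        (st.1 ++ [new_entry], st.2.1 ++ [st.2.2], st.2.2 + 1)
      else
        (st.1, st.2.1, st.2.2 + 1))
    ([[]], [], 0)
  ((PySem.List.remove? st.1 []).getD st.1, st.2.1)

-- ===== PORT B =====
def get_newDataset_alt (dataset : List (List String)) (attributes : List String) (best_attribute : String) (given_val : String) : List (List String) × List Int :=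
  let index : Nat := (PySem.List.index? attributes best_attribute).getD 0
  let row_number_list : List Int := (PySem.List.enumerate dataset 0).filterMap
    (fun p => if PySem.List.pyGetD p.2 (index : Int) "" == given_val then some p.1 else none)
  let new_dataset : List (List String) := row_number_list.map (fun i =>
    let row := PySem.List.pyGetD dataset i []
    PySem.List.slice row none (some (index : Int)) ++ PySem.List.slice row (some ((index : Int) + 1)) none)
  (new_dataset, row_number_list)

-- ===== PRECONDITION & SPEC =====
-- Pre_ excludes exactly where Python A raises: best_attribute absent from attributes (ValueError from
-- .index) or some row shorter than the found index (IndexError from row[index]).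
def Pre_get_newDataset (dataset : List (List String)) (attributes : List String) (best_attribute : String) (given_val : String) : Prop :=
  best_attribute ∈ attributes ∧
  ∀ row ∈ dataset, (PySem.List.index? attributes best_attribute).getD 0 < row.length
instance (dataset : List (List String)) (attributes : List String) (best_attribute : String) (given_val : String) : Decidable (Pre_get_newDataset dataset attributes best_attribute given_val) := by unfold Pre_get_newDataset; infer_instance

def pvWitness_get_newDataset : List (List String) × List String × String × String :=
  ([["a", "x"], ["b", "y"], ["c", "x"]], ["u", "v"], "v", "x")

def Spec_get_newDataset (dataset : List (List String)) (attributes : List String) (best_attribute : String) (given_val : String) (out : List (List String) × List Int) : Prop := out = get_newDataset_alt dataset attributes best_attribute given_val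
instance (dataset : List (List String)) (attributes : List String) (best_attribute : String) (given_val : String) (out : List (List String) × List Int) : Decidable (Spec_get_newDataset dataset attributes best_attribute given_val out) := by unfold Spec_get_newDataset; infer_instance

-- ===== CLAIM (what is proved, stated in full; the proofs are below) =====
def Claim_equal_get_newDataset : Prop := ∀ (dataset : List (List String)) (attributes : List String) (best_attribute : String) (given_val : String), Dom_get_newDataset dataset attributes best_attribute given_val → Pre_get_newDataset dataset attributes best_attribute given_val → Spec_get_newDataset dataset attributes best_attribute given_val (get_newDataset dataset attributes best_attribute given_val)

-- ===== LEMMAS AND PROOFS =====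

-- A's inner copy loop over range(len(row)), restricted to the first n elements, is take/drop around idx.
lemma inner_aux (row : List String) (idx : Nat) (n : Nat) (h : n ≤ row.length) :
    (List.range n).foldl
      (fun acc k => if k ≠ idx then acc ++ [row.getD k ""] else acc) []
    = (row.take n).take idx ++ (row.take n).drop (idx + 1) := by
  induction n with
  | zero => simp
  | succ n ih =>
    have hn : n ≤ row.length := by omega
    have hnl : n < row.length := by omega
    rw [List.range_succ, List.foldl_append, ih hn]
    have htake : row.take (n + 1) = row.take n ++ [row[n]] := by
      rw [List.take_add_one]
      simp [List.getElem?_eq_getElem hnl]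
    have hlen : (row.take n).length = n := by rw [List.length_take]; omega
    have hlen2 : (row.take n ++ [row[n]]).length = n + 1 := by
      simp only [List.length_append, List.length_cons, List.length_nil, hlen]
    simp only [List.foldl_cons, List.foldl_nil]
    rw [htake]
    rcases lt_trichotomy n idx with hlt | heq | hgt
    · rw [if_pos (by omega),
          List.take_of_length_le (l := row.take n) (by omega),
          List.take_of_length_le (l := row.take n ++ [row[n]]) (by omega),
          List.drop_eq_nil_of_le (as := row.take n) (by omega),
          List.drop_eq_nil_of_le (as := row.take n ++ [row[n]]) (by omega)]
      simp [List.getD_eq_getElem?_getD, List.getElem?_eq_getElem hnl]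
    · subst heq
      rw [if_neg (by simp),
          List.take_of_length_le (l := row.take n) (by omega),
          List.take_append_of_le_length (by omega),
          List.take_of_length_le (l := row.take n) (by omega),
          List.drop_eq_nil_of_le (as := row.take n) (by omega),
          List.drop_eq_nil_of_le (as := row.take n ++ [row[n]]) (by omega)]
    · rw [if_pos (by omega),
          List.take_append_of_le_length (by omega),
          List.drop_append_of_le_length (by omega)]
      simp [List.getD_eq_getElem?_getD, List.getElem?_eq_getElem hnl, List.append_assoc]

-- A's inner loop in its ported form equals the two slices B uses (on in-range idx).
lemma inner_eq (row : List String) (idx : Nat) :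
    (PySem.List.pyRange 0 (row.length : Int) 1).foldl
      (fun acc i => if i ≠ (idx : Int) then acc ++ [PySem.List.pyGetD row i ""] else acc) []
    = row.take idx ++ row.drop (idx + 1) := by
  rw [PySem.List.pyRange_zero_natCast, List.foldl_map]
  have : ∀ (acc : List String) (k : Nat),
      (if (k : Int) ≠ (idx : Int) then acc ++ [PySem.List.pyGetD row (k : Int) ""] else acc)
      = (if k ≠ idx then acc ++ [row.getD k ""] else acc) := by
    intro acc k
    simp [PySem.List.pyGetD_natCast, Nat.cast_inj]
  simp only [this]
  rw [inner_aux row idx row.length le_rfl]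
  simp

-- A's outer loop, started at counter s with arbitrary accumulators, in closed form over enumerate.
lemma outer_aux {α β : Type} (cond : α → Bool) (red : α → β) (rows : List α)
    (nd0 : List β) (rnl0 : List Int) (s : Int) :
    rows.foldl
      (fun (st : List β × List Int × Int) row =>
        if cond row then (st.1 ++ [red row], st.2.1 ++ [st.2.2], st.2.2 + 1)
        else (st.1, st.2.1, st.2.2 + 1))
      (nd0, rnl0, s)
    = (nd0 ++ (PySem.List.enumerate rows s).filterMap
          (fun p => if cond p.2 then some (red p.2) else none),
       rnl0 ++ (PySem.List.enumerate rows s).filterMap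
          (fun p => if cond p.2 then some p.1 else none),
       s + rows.length) := by
  induction rows generalizing nd0 rnl0 s with
  | nil => simp [PySem.List.enumerate_nil]
  | cons r rows ih =>
    rw [PySem.List.enumerate_cons]
    by_cases hc : cond r
    · simp only [List.foldl_cons, ih, List.filterMap_cons, hc]
      simp only [Prod.mk.injEq]
      refine ⟨by simp, by first | rfl | simp, by rw [List.length_cons]; push_cast; omega⟩
    · simp only [List.foldl_cons, ih, List.filterMap_cons, hc]
      simp only [Prod.mk.injEq]
      refine ⟨rfl, rfl, by rw [List.length_cons]; push_cast; omega⟩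

-- B's gather pass, rewritten to read each row from the enumerate pair rather than by dataset[i].
lemma gather_eq (dataset : List (List String)) (idx : Nat) (gv : String) :
    ((PySem.List.enumerate dataset 0).filterMap
        (fun p => if PySem.List.pyGetD p.2 (idx : Int) "" == gv then some p.1 else none)).map
      (fun i =>
        let row := PySem.List.pyGetD dataset i []
        PySem.List.slice row none (some (idx : Int)) ++
          PySem.List.slice row (some ((idx : Int) + 1)) none)
    = (PySem.List.enumerate dataset 0).filterMap
        (fun p => if PySem.List.pyGetD p.2 (idx : Int) "" == gv then
            some (p.2.take idx ++ p.2.drop (idx + 1)) else none) := by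
  rw [List.map_filterMap]
  apply List.filterMap_congr
  intro p hp
  obtain ⟨k, hk, rfl⟩ := (PySem.List.mem_enumerate_iff dataset 0 p).1 hp
  have h0 : (0 : Int) ≤ (idx : Int) + 1 := by omega
  have h2 : ((idx : Int) + 1).toNat = idx + 1 := by omega
  have hget : dataset[k]?.getD [] = dataset[k] := by simp [List.getElem?_eq_getElem hk]
  simp [PySem.List.slice_to_natCast, PySem.List.slice_from dataset[k] h0, h2, hget]

-- ===== VERDICT (by name: the statement is the Claim_ definition above) =====
theorem get_newDataset_spec : Claim_equal_get_newDataset := by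
  intro dataset attributes best_attribute given_val _hdom _hpre
  unfold Spec_get_newDataset get_newDataset get_newDataset_alt
  simp only [inner_eq]
  rw [outer_aux (fun row => PySem.List.pyGetD row ((PySem.List.index? attributes best_attribute).getD 0 : Int) "" == given_val)
      (fun row => row.take ((PySem.List.index? attributes best_attribute).getD 0) ++
        row.drop ((PySem.List.index? attributes best_attribute).getD 0 + 1))]
  simp only [List.singleton_append, PySem.List.remove?_cons_self, Option.getD_some]
  rw [gather_eq]
  simp
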